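-- pv_equiv track=rewrite | github.com/theshamiksinha/CoSyLab-token-tagging-transformers | code_model.py | bio_encode_tags
-- ===== SOURCE A (Python) =====
-- def bio_encode_tags(tags):
--     bio_tags = []
--     prev_tag = "O"
--     for tag in tags:
--         if tag == "O":
--             bio_tags.append("O")
--             prev_tag = "O"
--         else:
--             # Start a new entity if the previous tag was different (or O)
--             if prev_tag != tag:
--                 bio_tags.append("B-" + tag)
--             else:
--                 bio_tags.append("I-" + tag)
--             prev_tag = tag
--     return bio_tags
-- ===== SOURCE B (Python) =====
-- def bio_encode_tags(tags):
--     out = []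
--     i = 0
--     n = len(tags)
--     while i < n:
--         t = tags[i]
--         j = i + 1
--         while j < n and tags[j] == t:
--             j += 1
--         if t == "O":
--             out.extend(["O"] * (j - i))
--         else:
--             out.append("B-" + t)
--             out.extend(["I-" + t] * (j - i - 1))
--         i = j
--     return out
-- ===== Notes on version B (the rewrite author's own statement) =====
-- stated objective: alternative
-- what changed: Replaced the per-element prev_tag state machine with a run-splitting pass: the input is cut into maximal runs of equal tags and each run emits 'O'*n or 'B-'+tag followed by (n-1) 'I-'+tag entries.
import Mathlib
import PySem

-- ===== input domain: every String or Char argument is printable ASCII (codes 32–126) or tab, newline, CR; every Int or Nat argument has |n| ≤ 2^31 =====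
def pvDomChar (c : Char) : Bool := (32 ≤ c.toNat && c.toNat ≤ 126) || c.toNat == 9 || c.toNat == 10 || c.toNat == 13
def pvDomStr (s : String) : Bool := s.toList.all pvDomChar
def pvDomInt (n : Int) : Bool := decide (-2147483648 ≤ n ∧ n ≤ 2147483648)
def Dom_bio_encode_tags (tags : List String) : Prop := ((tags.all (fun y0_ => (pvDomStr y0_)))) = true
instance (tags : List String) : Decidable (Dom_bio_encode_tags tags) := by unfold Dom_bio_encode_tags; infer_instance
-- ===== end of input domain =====

-- B replaces A's per-element prev_tag state machine by splitting the input into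
-- maximal runs of equal tags and emitting each run's BIO entries at once (objective: alternative).

-- ===== PORT A =====
-- A: fold over tags carrying (bio_tags, prev_tag)
def bioStepA (acc : List String × String) (tag : String) : List String × String :=
  if tag = "O" then (acc.1 ++ ["O"], "O")
  else if acc.2 ≠ tag then (acc.1 ++ ["B-" ++ tag], tag)
  else (acc.1 ++ ["I-" ++ tag], tag)

def bio_encode_tags (tags : List String) : List String :=
  (tags.foldl bioStepA ([], "O")).1

-- ===== PORT B =====
-- B: split off the maximal run of the head tag, emit its entries, recurse on the rest
def bio_encode_tags_alt (tags : List String) : List String :=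
  match tags with
  | [] => []
  | t :: rest =>
    let k := (rest.takeWhile (· = t)).length
    let run := if t = "O" then List.replicate (k + 1) "O"
               else ("B-" ++ t) :: List.replicate k ("I-" ++ t)
    run ++ bio_encode_tags_alt (rest.dropWhile (· = t))
termination_by tags.length
decreasing_by
  simp only [List.length_cons]
  exact Nat.lt_succ_of_le (List.length_dropWhile_le _ _)

-- ===== PRECONDITION & SPEC =====
def Spec_bio_encode_tags (tags : List String) (out : List String) : Prop := out = bio_encode_tags_alt tags
instance (tags : List String) (out : List String) : Decidable (Spec_bio_encode_tags tags out) := by unfold Spec_bio_encode_tags; infer_instance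

-- ===== CLAIM (what is proved, stated in full; the proofs are below) =====
def Claim_equal_bio_encode_tags : Prop := ∀ (tags : List String), Dom_bio_encode_tags tags → Spec_bio_encode_tags tags (bio_encode_tags tags)

-- ===== LEMMAS AND PROOFS =====

-- A's loop, written as a direct recursion on the list with the prev_tag parameter
def goA (prev : String) : List String → List String
  | [] => []
  | t :: ts =>
    if t = "O" then "O" :: goA "O" ts
    else if prev ≠ t then ("B-" ++ t) :: goA t ts
    else ("I-" ++ t) :: goA t ts

theorem foldl_bioStepA (ts : List String) (acc : List String) (prev : String) :
    (ts.foldl bioStepA (acc, prev)).1 = acc ++ goA prev ts := by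
  induction ts generalizing acc prev with
  | nil => simp [goA]
  | cons t ts ih =>
    simp only [List.foldl_cons, bioStepA, goA]
    by_cases h : t = "O"
    · simp [h, ih]
    · by_cases h2 : prev ≠ t <;> simp [h, h2, ih]

theorem takeWhile_eq_replicate (t : String) (ts : List String) :
    ts.takeWhile (· = t) = List.replicate (ts.takeWhile (· = t)).length t := by
  rw [List.eq_replicate_iff]
  exact ⟨rfl, fun b hb => by simpa using List.mem_takeWhile_imp hb⟩

theorem goA_O_run (k : Nat) (rest : List String) :
    goA "O" (List.replicate k "O" ++ rest) = List.replicate k "O" ++ goA "O" rest := by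
  induction k with
  | zero => simp
  | succ k ih => simp [List.replicate_succ, goA, ih]

theorem goA_run (t : String) (ht : t ≠ "O") (k : Nat) (rest : List String) :
    goA t (List.replicate k t ++ rest) = List.replicate k ("I-" ++ t) ++ goA t rest := by
  induction k with
  | zero => simp
  | succ k ih => simp [List.replicate_succ, goA, ht, ih]

theorem head_dropWhile_ne (t : String) (ts : List String) (h : String)
    (hh : (ts.dropWhile (· = t)).head? = some h) : h ≠ t := by
  induction ts with
  | nil => simp at hh
  | cons a ts ih =>
    by_cases ha : a = t
    · rw [List.dropWhile_cons_of_pos (by simp [ha])] at hh; exact ih hh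
    · rw [List.dropWhile_cons_of_neg (by simp [ha])] at hh
      simp only [List.head?_cons, Option.some.injEq] at hh
      subst hh; exact ha

theorem goA_eq_alt (n : Nat) (ts : List String) (hn : ts.length ≤ n) (prev : String)
    (hp : ∀ h, ts.head? = some h → h ≠ "O" → prev ≠ h) :
    goA prev ts = bio_encode_tags_alt ts := by
  induction n generalizing ts prev with
  | zero =>
    have : ts = [] := List.eq_nil_of_length_eq_zero (Nat.le_zero.mp hn)
    subst this; simp [goA, bio_encode_tags_alt]
  | succ n ih =>
    match ts with
    | [] => simp [goA, bio_encode_tags_alt]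
    | t :: rest =>
      have hsplit : rest = rest.takeWhile (· = t) ++ rest.dropWhile (· = t) :=
        (List.takeWhile_append_dropWhile).symm
      set k := (rest.takeWhile (· = t)).length with hk
      have hrep : rest.takeWhile (· = t) = List.replicate k t := takeWhile_eq_replicate t rest
      have hdroplen : (rest.dropWhile (· = t)).length ≤ n := by
        have h1 := List.length_dropWhile_le (p := (· = t)) (l := rest)
        have h2 : rest.length ≤ n := by simpa using Nat.le_of_succ_le_succ hn
        omega
      have hnext : ∀ h, (rest.dropWhile (· = t)).head? = some h → h ≠ "O" → t ≠ h := by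
        intro h hh _; exact fun e => (head_dropWhile_ne t rest h hh) e.symm
      rw [show goA prev (t :: rest) = goA prev (t :: (List.replicate k t ++ rest.dropWhile (· = t))) by
        rw [← hrep, ← hsplit]]
      rw [show bio_encode_tags_alt (t :: rest) =
            (if t = "O" then List.replicate (k + 1) "O"
             else ("B-" ++ t) :: List.replicate k ("I-" ++ t)) ++
            bio_encode_tags_alt (rest.dropWhile (· = t)) by
        rw [bio_encode_tags_alt]]
      by_cases ht : t = "O"
      · subst ht
        simp only [goA]
        rw [goA_O_run, ih _ hdroplen "O" ?_]
        · simp [List.replicate_succ]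
        · intro h hh hO; exact fun e => (head_dropWhile_ne _ rest h hh) e.symm
      · have hprev : prev ≠ t := hp t rfl ht
        simp only [goA, if_pos hprev, if_neg ht]
        rw [goA_run t ht, ih _ hdroplen t (hnext)]
        simp

-- ===== VERDICT (by name: the statement is the Claim_ definition above) =====
theorem bio_encode_tags_spec : Claim_equal_bio_encode_tags := by
  intro tags _
  unfold Spec_bio_encode_tags bio_encode_tags
  rw [foldl_bioStepA, List.nil_append]
  exact goA_eq_alt tags.length tags le_rfl "O" (fun h _ hO => Ne.symm hO)
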